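-- pv_equiv track=rewrite | github.com/Aiow-dev/MCryptApp | Scripts/double_permutation.py | dec_double_permutation
-- ===== SOURCE A (Python) =====
-- def dec_double_permutation(enc_msg, row, clm, key_row, key_clm):
--     enc_msg = enc_msg.replace(' ', '').upper()
--
--     if len(enc_msg) != row * clm:
--         return 'Ошибка заполнения таблицы. Проверьте количество строк и столбцов'
--
--     clm_table = {}
--
--     for index_clm, num_clm in enumerate(key_clm):
--         part_clm_table = []
--
--         for index_row in range(row):
--             offset = index_row * clm + index_clm
--             part_clm_table.append(enc_msg[offset])
--
--         clm_table[str(index_clm + 1)] = part_clm_table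
--
--     clm_table_key = [clm_table[key] for key in key_clm]
--
--     row_table = {}
--
--     for index_row, num_row in enumerate(key_row):
--         part_row_table = [clm_table_key[index_clm][index_row] for index_clm in range(clm)]
--
--         row_table[str(index_row + 1)] = part_row_table
--
--     row_table_key = [row_table[key] for key in key_row]
--
--     return ''.join(''.join(part_row) for part_row in row_table_key)
-- ===== SOURCE B (Python) =====
-- def dec_double_permutation(enc_msg, row, clm, key_row, key_clm):
--     enc_msg = enc_msg.replace(' ', '').upper()
--
--     if len(enc_msg) != row * clm:
--         return 'Ошибка заполнения таблицы. Проверьте количество строк и столбцов'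
--
--     # positions of each key value on its axis (str(i+1) -> i), computed once;
--     # the output is then a single arithmetic gather over the flat message.
--     src_row = {str(i + 1): i for i in range(len(key_row))}
--     src_clm = {str(i + 1): i for i in range(len(key_clm))}
--
--     return ''.join(enc_msg[src_row[r] * clm + src_clm[key_clm[j]]]
--                    for r in key_row for j in range(clm))
-- ===== Notes on version B (the rewrite author's own statement) =====
-- stated objective: simpler
-- what changed: Instead of materialising a column table and a row table as dicts of character lists and reindexing the grid twice, B inverts each key once into a position map and emits the output in a single arithmetic gather enc_msg[src_row[r]*clm + src_clm[c]] over the flat message.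
import Mathlib
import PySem

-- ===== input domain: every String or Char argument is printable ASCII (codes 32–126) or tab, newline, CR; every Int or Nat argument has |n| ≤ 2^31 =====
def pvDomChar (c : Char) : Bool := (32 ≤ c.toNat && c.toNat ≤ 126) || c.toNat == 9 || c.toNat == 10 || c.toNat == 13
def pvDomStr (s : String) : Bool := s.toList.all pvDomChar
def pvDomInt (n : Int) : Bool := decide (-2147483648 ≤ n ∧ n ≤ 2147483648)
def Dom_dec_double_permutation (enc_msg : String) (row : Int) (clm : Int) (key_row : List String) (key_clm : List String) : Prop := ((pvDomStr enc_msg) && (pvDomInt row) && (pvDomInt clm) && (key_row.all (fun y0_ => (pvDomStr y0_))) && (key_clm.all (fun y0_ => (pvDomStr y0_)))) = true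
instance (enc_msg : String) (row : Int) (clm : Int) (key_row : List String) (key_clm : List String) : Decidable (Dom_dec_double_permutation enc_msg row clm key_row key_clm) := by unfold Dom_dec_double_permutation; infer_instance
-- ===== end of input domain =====

-- B replaces A's two dict-of-column/row tables and double reindexing by two position maps
-- (str(i+1) -> i) and a single arithmetic gather over the flat message (objective: simpler).

-- ===== PORT A =====
-- literal transliteration of A; the Option value is none exactly where the Python raises
-- (IndexError/KeyError), and those inputs are excluded by Pre_ below (the none branch yields "").
def dec_double_permutation (enc_msg : String) (row : Int) (clm : Int) (key_row : List String) (key_clm : List String) : String :=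
  let msg := PySem.Str.upper (PySem.Str.replace enc_msg " " "")
  if PySem.Str.len msg ≠ row * clm then
    "Ошибка заполнения таблицы. Проверьте количество строк и столбцов"
  else
    let result : Option (List (List Char)) := do
      let clm_table ← (PySem.List.enumerate key_clm).foldlM
        (fun (d : PySem.Dict String (List Char)) p => do
          let part ← (PySem.List.pyRange 0 row 1).foldlM
            (fun (part : List Char) index_row => do
              let c ← PySem.Str.pyGet? msg (index_row * clm + p.1)
              pure (part ++ [c])) []
          pure (d.insert (PySem.Int.toStr (p.1 + 1)) part)) PySem.Dict.empty
      let clm_table_key ← key_clm.mapM (fun k => clm_table.get? k)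
      let row_table ← (PySem.List.enumerate key_row).foldlM
        (fun (d : PySem.Dict String (List Char)) p => do
          let part ← (PySem.List.pyRange 0 clm 1).mapM
            (fun index_clm => do
              let col ← PySem.List.pyGet? clm_table_key index_clm
              PySem.List.pyGet? col p.1)
          pure (d.insert (PySem.Int.toStr (p.1 + 1)) part)) PySem.Dict.empty
      let row_table_key ← key_row.mapM (fun k => row_table.get? k)
      pure row_table_key
    match result with
    | some parts => String.ofList parts.flatten
    | none => ""

-- ===== PORT B =====
def dec_double_permutation_alt (enc_msg : String) (row : Int) (clm : Int) (key_row : List String) (key_clm : List String) : String :=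
  let msg := PySem.Str.upper (PySem.Str.replace enc_msg " " "")
  if PySem.Str.len msg ≠ row * clm then
    "Ошибка заполнения таблицы. Проверьте количество строк и столбцов"
  else
    let src_row : PySem.Dict String Int :=
      (PySem.List.pyRange 0 (key_row.length : Int) 1).foldl
        (fun d i => d.insert (PySem.Int.toStr (i + 1)) i) PySem.Dict.empty
    let src_clm : PySem.Dict String Int :=
      (PySem.List.pyRange 0 (key_clm.length : Int) 1).foldl
        (fun d i => d.insert (PySem.Int.toStr (i + 1)) i) PySem.Dict.empty
    let out : Option (List (List Char)) :=
      key_row.mapM (fun r =>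
        (PySem.List.pyRange 0 clm 1).mapM (fun j => do
          let ri ← src_row.get? r
          let s ← PySem.List.pyGet? key_clm j
          let ci ← src_clm.get? s
          PySem.Str.pyGet? msg (ri * clm + ci)))
    match out with
    | some parts => String.ofList parts.flatten
    | none => ""

-- ===== PRECONDITION & SPEC =====
-- Pre_ is exactly the set of inputs on which the Python A returns normally: either the size check
-- fails (error string), or the key lists are consistent with the table shape and every key entry is
-- the canonical decimal string of a 1-based index of its axis (otherwise A raises IndexError/KeyError).
def Pre_dec_double_permutation (enc_msg : String) (row : Int) (clm : Int) (key_row : List String) (key_clm : List String) : Prop :=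
  PySem.Str.len (PySem.Str.upper (PySem.Str.replace enc_msg " " "")) ≠ row * clm ∨
  ((1 ≤ row → (key_clm.length : Int) ≤ clm) ∧
   (∀ s ∈ key_clm, ∃ m ∈ List.range key_clm.length, s = PySem.Int.toStr ((m : Int) + 1)) ∧
   (key_row ≠ [] → 1 ≤ clm → clm ≤ (key_clm.length : Int) ∧ (key_row.length : Int) ≤ row) ∧
   (∀ s ∈ key_row, ∃ m ∈ List.range key_row.length, s = PySem.Int.toStr ((m : Int) + 1)))
instance (enc_msg : String) (row : Int) (clm : Int) (key_row : List String) (key_clm : List String) : Decidable (Pre_dec_double_permutation enc_msg row clm key_row key_clm) := by unfold Pre_dec_double_permutation; infer_instance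

def pvWitness_dec_double_permutation : String × Int × Int × List String × List String :=
  ("ABCD", 2, 2, ["2", "1"], ["1", "2"])

def Spec_dec_double_permutation (enc_msg : String) (row : Int) (clm : Int) (key_row : List String) (key_clm : List String) (out : String) : Prop := out = dec_double_permutation_alt enc_msg row clm key_row key_clm
instance (enc_msg : String) (row : Int) (clm : Int) (key_row : List String) (key_clm : List String) (out : String) : Decidable (Spec_dec_double_permutation enc_msg row clm key_row key_clm out) := by unfold Spec_dec_double_permutation; infer_instance

-- ===== CLAIM (what is proved, stated in full; the proofs are below) =====
def Claim_equal_dec_double_permutation : Prop := ∀ (enc_msg : String) (row : Int) (clm : Int) (key_row : List String) (key_clm : List String), Dom_dec_double_permutation enc_msg row clm key_row key_clm → Pre_dec_double_permutation enc_msg row clm key_row key_clm → Spec_dec_double_permutation enc_msg row clm key_row key_clm (dec_double_permutation enc_msg row clm key_row key_clm)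

-- ===== LEMMAS AND PROOFS =====

lemma pv_toDigitsCore_append (f : Nat) : ∀ (n : Nat) (ds : List Char),
    Nat.toDigitsCore 10 f n ds = Nat.toDigitsCore 10 f n [] ++ ds := by
  induction f with
  | zero => intro n ds; simp [Nat.toDigitsCore]
  | succ f ih =>
    intro n ds
    simp only [Nat.toDigitsCore]
    split
    · simp
    · rw [ih (n / 10) (Nat.digitChar (n % 10) :: ds), ih (n / 10) [Nat.digitChar (n % 10)]]
      simp

def pvDec10 (cs : List Char) : Nat := cs.foldl (fun a c => 10 * a + (c.toNat - 48)) 0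

lemma pvDec10_aux (f : Nat) : ∀ (n : Nat), n < f → pvDec10 (Nat.toDigitsCore 10 f n []) = n := by
  induction f with
  | zero => omega
  | succ f ih =>
    intro n hn
    simp only [Nat.toDigitsCore]
    split
    · rename_i h
      have h10 : n < 10 := by omega
      interval_cases n <;> decide
    · rename_i h
      rw [pv_toDigitsCore_append]
      have hd : n / 10 < f := by omega
      have : pvDec10 (Nat.toDigitsCore 10 f (n / 10) [] ++ [Nat.digitChar (n % 10)]) =
          10 * pvDec10 (Nat.toDigitsCore 10 f (n / 10) []) + ((Nat.digitChar (n % 10)).toNat - 48) := by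
        simp [pvDec10, List.foldl_append]
      rw [this, ih _ hd]
      have hm : n % 10 < 10 := Nat.mod_lt _ (by omega)
      have : (Nat.digitChar (n % 10)).toNat - 48 = n % 10 := by
        set m := n % 10 with hm'
        interval_cases m <;> decide
      omega

lemma pvDec10_toDigits (n : Nat) : pvDec10 (Nat.toDigits 10 n) = n := by
  have := pvDec10_aux (n + 1) n (by omega)
  simpa [Nat.toDigits] using this

def pvKv (s : String) : Int := (pvDec10 s.toList : Int)

lemma pvKv_toStr (i : Int) (h : 0 ≤ i) : pvKv (PySem.Int.toStr i) = i := by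
  unfold pvKv
  rw [PySem.Int.toList_toStr]
  unfold PySem.Int.toChars
  rw [if_neg (by omega)]
  rw [pvDec10_toDigits]
  omega

lemma pv_toStr_inj {a b : Int} (ha : 0 ≤ a) (hb : 0 ≤ b)
    (h : PySem.Int.toStr a = PySem.Int.toStr b) : a = b := by
  have := congrArg pvKv h
  rwa [pvKv_toStr a ha, pvKv_toStr b hb] at this


lemma pv_mapM_eq_some_map {α β : Type} (G : α → Option β) (g : α → β) :
    ∀ (l : List α), (∀ x ∈ l, G x = some (g x)) → l.mapM G = some (l.map g) := by
  intro l
  induction l with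
  | nil => intro _; rfl
  | cons x xs ih =>
    intro h
    rw [List.mapM_cons, h x (by simp), ih (fun y hy => h y (by simp [hy]))]
    rfl

lemma pv_foldlM_append_eq {α β : Type} (G : α → Option β) (g : α → β) :
    ∀ (l : List α) (a : List β), (∀ x ∈ l, G x = some (g x)) →
      l.foldlM (fun acc x => do let c ← G x; pure (acc ++ [c])) a = some (a ++ l.map g) := by
  intro l
  induction l with
  | nil => intro a _; simp
  | cons x xs ih =>
    intro a h
    rw [List.foldlM_cons]
    simp only [h x (by simp)]
    rw [show ((do
        let c ← some (g x)
        pure (a ++ [c]) : Option (List β))) = some (a ++ [g x]) from rfl]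
    rw [show ((do
        let init ← some (a ++ [g x])
        xs.foldlM (fun acc x => do let c ← G x; pure (acc ++ [c])) init : Option (List β)))
      = xs.foldlM (fun acc x => do let c ← G x; pure (acc ++ [c])) (a ++ [g x]) from rfl]
    rw [ih (a ++ [g x]) (fun y hy => h y (by simp [hy]))]
    simp

lemma pv_pyGet?_eq_pyGetD {α : Type} (xs : List α) (i : Int) (d : α)
    (h0 : 0 ≤ i) (h1 : i < xs.length) :
    PySem.List.pyGet? xs i = some (PySem.List.pyGetD xs i d) := by
  rw [PySem.List.pyGet?_eq_some_getElem xs h0 h1, PySem.List.pyGetD_eq_getElem xs d h0 h1]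

lemma pv_pyGetD_map {α β : Type} (f : α → β) (l : List α) (j : Int) (d : α) (d' : β)
    (h0 : 0 ≤ j) (h1 : j < l.length) :
    PySem.List.pyGetD (l.map f) j d' = f (PySem.List.pyGetD l j d) := by
  rw [PySem.List.pyGetD_eq_getElem (l.map f) d' h0 (by simpa using h1),
      PySem.List.pyGetD_eq_getElem l d h0 h1]
  simp

lemma pv_get_foldl_insert {α : Type} (g : Int → α) :
    ∀ (k : Nat) (a : Int) (d : PySem.Dict String α) (m : Int), 0 ≤ a → a ≤ m → m < a + k →
      ((PySem.List.pyRange a (a + k) 1).foldl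
          (fun d i => d.insert (PySem.Int.toStr (i + 1)) (g i)) d).get?
        (PySem.Int.toStr (m + 1)) = some (g m) := by
  intro k
  induction k with
  | zero => intro a d m _ h1 h2; omega
  | succ k ih =>
    intro a d m h0 h1 h2
    rw [show (a + (k + 1 : Nat) : Int) = (a + k) + 1 by push_cast; ring,
        PySem.List.pyRange_one_succ_right (by omega), List.foldl_append]
    simp only [List.foldl_cons, List.foldl_nil]
    by_cases hm : m = a + k
    · subst hm
      rw [PySem.Dict.get?_insert_self]
    · rw [PySem.Dict.get?_insert_of_ne]
      · exact ih a d m h0 h1 (by omega)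
      · intro hc
        exact hm (by have := pv_toStr_inj (by omega) (by omega) hc; omega)

lemma pv_foldlM_enum_insert {α : Type} (F : Int → Option α) (g : Int → α) :
    ∀ (key : List String) (s : Int) (d : PySem.Dict String α),
      (∀ i : Int, s ≤ i → i < s + key.length → F i = some (g i)) →
      (PySem.List.enumerate key s).foldlM
          (fun d p => do
            let part ← F p.1
            pure (d.insert (PySem.Int.toStr (p.1 + 1)) part)) d
        = some ((PySem.List.pyRange s (s + key.length) 1).foldl
            (fun d i => d.insert (PySem.Int.toStr (i + 1)) (g i)) d) := by
  intro key
  induction key with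
  | nil =>
    intro s d _
    simp [PySem.List.enumerate_nil]
  | cons x xs ih =>
    intro s d h
    rw [PySem.List.enumerate_cons, List.foldlM_cons]
    have hF : F s = some (g s) := h s (le_refl s)
      (by simp only [List.length_cons]; push_cast; omega)
    simp only [hF]
    rw [show ((do
        let part ← some (g s)
        pure (d.insert (PySem.Int.toStr (s + 1)) part) : Option (PySem.Dict String α)))
      = some (d.insert (PySem.Int.toStr (s + 1)) (g s)) from rfl]
    rw [show ((do
        let init ← some (d.insert (PySem.Int.toStr (s + 1)) (g s))
        (PySem.List.enumerate xs (s+1)).foldlM (fun d p => do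
            let part ← F p.1
            pure (d.insert (PySem.Int.toStr (p.1 + 1)) part)) init : Option (PySem.Dict String α)))
      = (PySem.List.enumerate xs (s+1)).foldlM (fun d p => do
            let part ← F p.1
            pure (d.insert (PySem.Int.toStr (p.1 + 1)) part))
          (d.insert (PySem.Int.toStr (s + 1)) (g s)) from rfl]
    rw [show s + ((x::xs).length : Int) = (s + 1) + (xs.length : Int) by
      simp only [List.length_cons]; push_cast; ring]
    rw [PySem.List.pyRange_one_cons (by omega), List.foldl_cons]
    exact ih (s+1) _ (fun i hi1 hi2 => h i (by omega)
      (by simp only [List.length_cons] at *; push_cast at *; omega))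

-- ===== VERDICT (by name: the statement is the Claim_ definition above) =====
-- the common value: column j of the grid, and output row i after the column permutation
def pvColF (chars : List Char) (row clm j : Int) : List Char :=
  (PySem.List.pyRange 0 row 1).map (fun i => PySem.List.pyGetD chars (i * clm + j) ' ')

def pvRowPart (chars : List Char) (clm : Int) (key_clm : List String) (i : Int) : List Char :=
  (PySem.List.pyRange 0 clm 1).map
    (fun j => PySem.List.pyGetD chars (i * clm + (pvKv (PySem.List.pyGetD key_clm j "") - 1)) ' ')

lemma pv_main (enc_msg : String) (row clm : Int) (key_row key_clm : List String)
    (hpre : Pre_dec_double_permutation enc_msg row clm key_row key_clm) :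
    dec_double_permutation enc_msg row clm key_row key_clm
      = dec_double_permutation_alt enc_msg row clm key_row key_clm := by
  unfold dec_double_permutation dec_double_permutation_alt
  by_cases hc : PySem.Str.len (PySem.Str.upper (PySem.Str.replace enc_msg " " "")) ≠ row * clm
  · rw [if_pos hc, if_pos hc]
  · rw [if_neg hc, if_neg hc]
    rw [ne_eq, not_not] at hc
    rcases hpre with h | ⟨h1, h2, h3, h4⟩
    · exact absurd hc h
    have hlen : (((PySem.Str.upper (PySem.Str.replace enc_msg " " "")).toList.length : Int)) = row * clm := by
      rw [← PySem.Str.len_eq]; exact hc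
    set msg := PySem.Str.upper (PySem.Str.replace enc_msg " " "") with hmsg
    set chars := msg.toList with hchars
    -- abbreviations for the common value
    have hget : ∀ t : Int, 0 ≤ t → t < row * clm →
        PySem.Str.pyGet? msg t = some (PySem.List.pyGetD chars t ' ') := by
      intro t ht0 ht1
      have : PySem.List.pyGet? chars t = some (PySem.List.pyGetD chars t ' ') :=
        pv_pyGet?_eq_pyGetD chars t ' ' ht0 (by rw [hlen]; exact ht1)
      simpa using this
    have hidx : ∀ i j : Int, 0 ≤ i → i < row → 0 ≤ j → j < clm →
        0 ≤ i * clm + j ∧ i * clm + j < row * clm := by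
      intro i j hi0 hi1 hj0 hj1
      constructor
      · have := mul_nonneg hi0 (le_trans hj0 (le_of_lt hj1))
        omega
      · nlinarith [mul_le_mul_of_nonneg_right (show i + 1 ≤ row by omega)
          (show (0:Int) ≤ clm by omega)]
    -- A side, stage 1: the column table
    have hA1 := pv_foldlM_enum_insert
      (fun j => (PySem.List.pyRange 0 row 1).foldlM
        (fun (part : List Char) index_row => do
          let c ← PySem.Str.pyGet? msg (index_row * clm + j)
          pure (part ++ [c])) [])
      (pvColF chars row clm)
      key_clm 0 PySem.Dict.empty
      (by
        intro j hj0 hj1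
        rw [zero_add] at hj1
        refine pv_foldlM_append_eq _ _ _ [] ?_
        intro i hi
        rw [PySem.List.mem_pyRange_one] at hi
        have hrow1 : (1:Int) ≤ row := by omega
        have hjclm : j < clm := by have := h1 hrow1; omega
        obtain ⟨hb0, hb1⟩ := hidx i j hi.1 hi.2 hj0 hjclm
        exact hget _ hb0 hb1)
    rw [zero_add] at hA1
    -- A side, stage 2: reading the column table in key order
    have hctab : ∀ k ∈ key_clm,
        ((PySem.List.pyRange 0 (key_clm.length : Int) 1).foldl
            (fun d i => d.insert (PySem.Int.toStr (i + 1)) (pvColF chars row clm i))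
            PySem.Dict.empty).get? k = some (pvColF chars row clm (pvKv k - 1)) := by
      intro k hk
      obtain ⟨m, hm, hkeq⟩ := h2 k hk
      rw [List.mem_range] at hm
      subst hkeq
      have := pv_get_foldl_insert (pvColF chars row clm) key_clm.length 0
        PySem.Dict.empty (m : Int) (le_refl 0) (by omega) (by omega)
      rw [zero_add] at this
      rw [this, pvKv_toStr _ (by omega)]
      norm_num
    have hA2 := pv_mapM_eq_some_map
      (fun k => ((PySem.List.pyRange 0 (key_clm.length : Int) 1).foldl
          (fun d i => d.insert (PySem.Int.toStr (i + 1)) (pvColF chars row clm i))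
          PySem.Dict.empty).get? k)
      (fun k => pvColF chars row clm (pvKv k - 1)) key_clm hctab
    -- A side, stage 3: the row table
    have hA3 := pv_foldlM_enum_insert
      (fun i => (PySem.List.pyRange 0 clm 1).mapM
        (fun index_clm => do
          let col ← PySem.List.pyGet? (key_clm.map (fun k => pvColF chars row clm (pvKv k - 1))) index_clm
          PySem.List.pyGet? col i))
      (pvRowPart chars clm key_clm) key_row 0 PySem.Dict.empty
      (by
        intro i hi0 hi1
        rw [zero_add] at hi1
        have hkr : key_row ≠ [] := by
          intro hnil; rw [hnil] at hi1; simp at hi1; omega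
        refine pv_mapM_eq_some_map _ _ _ ?_
        intro j hj
        rw [PySem.List.mem_pyRange_one] at hj
        have hclm1 : (1:Int) ≤ clm := by omega
        obtain ⟨hcn1, hn2r⟩ := h3 hkr hclm1
        have hrow1 : (1:Int) ≤ row := by omega
        have hn1c : (key_clm.length : Int) ≤ clm := h1 hrow1
        have e1 : PySem.List.pyGet? (key_clm.map (fun k => pvColF chars row clm (pvKv k - 1))) j
            = some (PySem.List.pyGetD (key_clm.map (fun k => pvColF chars row clm (pvKv k - 1))) j []) :=
          pv_pyGet?_eq_pyGetD _ j [] hj.1 (by rw [List.length_map]; omega)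
        have e2 : PySem.List.pyGetD (key_clm.map (fun k => pvColF chars row clm (pvKv k - 1))) j []
            = pvColF chars row clm (pvKv (PySem.List.pyGetD key_clm j "") - 1) :=
          pv_pyGetD_map _ key_clm j "" [] hj.1 (by omega)
        have e3 : PySem.List.pyGet? (pvColF chars row clm (pvKv (PySem.List.pyGetD key_clm j "") - 1)) i
            = some (PySem.List.pyGetD chars
                (i * clm + (pvKv (PySem.List.pyGetD key_clm j "") - 1)) ' ') := by
          rw [pv_pyGet?_eq_pyGetD _ i ' ' hi0
            (by unfold pvColF; rw [List.length_map, PySem.List.length_pyRange_one]; omega)]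
          unfold pvColF
          rw [PySem.List.pyGetD_map_pyRange_of_nonneg _ row i ' ' hi0 (by omega)]
        rw [e1, e2]
        simp only [Option.bind_eq_bind, Option.bind_some]
        exact e3)
    rw [zero_add] at hA3
    -- A side, stage 4: reading the row table in key order
    have hrtab : ∀ r ∈ key_row,
        ((PySem.List.pyRange 0 (key_row.length : Int) 1).foldl
            (fun d i => d.insert (PySem.Int.toStr (i + 1)) (pvRowPart chars clm key_clm i))
            PySem.Dict.empty).get? r = some (pvRowPart chars clm key_clm (pvKv r - 1)) := by
      intro r hr
      obtain ⟨m, hm, hreq⟩ := h4 r hr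
      rw [List.mem_range] at hm
      subst hreq
      have := pv_get_foldl_insert (pvRowPart chars clm key_clm) key_row.length 0
        PySem.Dict.empty (m : Int) (le_refl 0) (by omega) (by omega)
      rw [zero_add] at this
      rw [this, pvKv_toStr _ (by omega)]
      norm_num
    have hA4 := pv_mapM_eq_some_map
      (fun r => ((PySem.List.pyRange 0 (key_row.length : Int) 1).foldl
          (fun d i => d.insert (PySem.Int.toStr (i + 1)) (pvRowPart chars clm key_clm i))
          PySem.Dict.empty).get? r)
      (fun r => pvRowPart chars clm key_clm (pvKv r - 1)) key_row hrtab
    -- B side: the single gather equals the same per-row values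
    have hB := pv_mapM_eq_some_map
      (fun r => (PySem.List.pyRange 0 clm 1).mapM (fun j => do
        let ri ← ((PySem.List.pyRange 0 (key_row.length : Int) 1).foldl
            (fun d i => d.insert (PySem.Int.toStr (i + 1)) i) PySem.Dict.empty).get? r
        let sj ← PySem.List.pyGet? key_clm j
        let ci ← ((PySem.List.pyRange 0 (key_clm.length : Int) 1).foldl
            (fun d i => d.insert (PySem.Int.toStr (i + 1)) i) PySem.Dict.empty).get? sj
        PySem.Str.pyGet? msg (ri * clm + ci)))
      (fun r => pvRowPart chars clm key_clm (pvKv r - 1)) key_row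
      (by
        intro r hr
        have hkr : key_row ≠ [] := List.ne_nil_of_mem hr
        obtain ⟨mr, hmr, hreq⟩ := h4 r hr
        rw [List.mem_range] at hmr
        refine pv_mapM_eq_some_map _ _ _ ?_
        intro j hj
        rw [PySem.List.mem_pyRange_one] at hj
        have hclm1 : (1:Int) ≤ clm := by omega
        obtain ⟨hcn1, hn2r⟩ := h3 hkr hclm1
        have hrow1 : (1:Int) ≤ row := by omega
        have hn1c : (key_clm.length : Int) ≤ clm := h1 hrow1
        have esr : ((PySem.List.pyRange 0 (key_row.length : Int) 1).foldl
            (fun d i => d.insert (PySem.Int.toStr (i + 1)) i) PySem.Dict.empty).get? r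
            = some ((mr : Int)) := by
          subst hreq
          have := pv_get_foldl_insert (fun i : Int => i) key_row.length 0
            PySem.Dict.empty (mr : Int) (le_refl 0) (by omega) (by omega)
          rw [zero_add] at this
          exact this
        have hkvr : pvKv r - 1 = (mr : Int) := by
          subst hreq; rw [pvKv_toStr _ (by omega)]; ring
        have es : PySem.List.pyGet? key_clm j
            = some (PySem.List.pyGetD key_clm j "") :=
          pv_pyGet?_eq_pyGetD key_clm j "" hj.1 (by omega)
        have hsj_mem : PySem.List.pyGetD key_clm j "" ∈ key_clm := by
          rw [PySem.List.pyGetD_eq_getElem key_clm "" hj.1 (by omega)]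
          exact List.getElem_mem _
        obtain ⟨mc, hmc, hceq⟩ := h2 _ hsj_mem
        rw [List.mem_range] at hmc
        have esc : ((PySem.List.pyRange 0 (key_clm.length : Int) 1).foldl
            (fun d i => d.insert (PySem.Int.toStr (i + 1)) i) PySem.Dict.empty).get?
            (PySem.List.pyGetD key_clm j "") = some ((mc : Int)) := by
          rw [hceq]
          have := pv_get_foldl_insert (fun i : Int => i) key_clm.length 0
            PySem.Dict.empty (mc : Int) (le_refl 0) (by omega) (by omega)
          rw [zero_add] at this
          exact this
        have hkvc : pvKv (PySem.List.pyGetD key_clm j "") - 1 = (mc : Int) := by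
          rw [hceq, pvKv_toStr _ (by omega)]; ring
        obtain ⟨hb0, hb1⟩ := hidx (mr : Int) (mc : Int) (by omega) (by omega) (by omega) (by omega)
        have echar := hget _ hb0 hb1
        rw [esr, es]
        simp only [Option.bind_eq_bind, Option.bind_some]
        rw [esc]
        simp only [Option.bind_some]
        rw [echar, hkvr, hkvc])
    -- put the pipeline together
    simp only [Option.bind_eq_bind] at hA1 hA3 hB ⊢
    simp only [hA1, Option.bind_some]
    simp only [hA2, Option.bind_some]
    simp only [hA3, Option.bind_some]
    simp only [hA4, Option.bind_some]
    simp only [hB]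

-- ===== VERDICT (by name: the statement is the Claim_ definition above) =====
theorem dec_double_permutation_spec : Claim_equal_dec_double_permutation := by
  intro enc_msg row clm key_row key_clm _ hpre
  unfold Spec_dec_double_permutation
  exact pv_main enc_msg row clm key_row key_clm hpre
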